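-- pv_equiv track=rewrite | github.com/konbusalov/IGI-repository | IGI/LR3/analyse_text.py | starts_with_consonants_count
-- ===== SOURCE A (Python) =====
-- def is_consonant(char):
--     vowels = "aeiouyAEIOUY"
--     return char.isalpha() and char not in vowels
--
-- def starts_with_consonants_count(text: str):
--     if not isinstance(text, str):
--         raise TypeError("Input must be a string")
--
--     count = 0
--     words = text.split()
--
--     for word in words:
--         if is_consonant(word[0]):
--             count += 1
--
--     return count
-- ===== SOURCE B (Python) =====
-- def is_consonant(char):
--     vowels = "aeiouyAEIOUY"
--     return char.isalpha() and char not in vowels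
--
-- def starts_with_consonants_count(text: str):
--     if not isinstance(text, str):
--         raise TypeError("Input must be a string")
--
--     count = 0
--     prev_is_space = True
--     for ch in text:
--         if not ch.isspace() and prev_is_space and is_consonant(ch):
--             count += 1
--         prev_is_space = ch.isspace()
--     return count
-- ===== Notes on version B (the rewrite author's own statement) =====
-- stated objective: alternative
-- what changed: Replaces split()+per-word first-char indexing with a single character scan that detects word starts via a prev_is_space flag, never materialising the word list.
import Mathlib
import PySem

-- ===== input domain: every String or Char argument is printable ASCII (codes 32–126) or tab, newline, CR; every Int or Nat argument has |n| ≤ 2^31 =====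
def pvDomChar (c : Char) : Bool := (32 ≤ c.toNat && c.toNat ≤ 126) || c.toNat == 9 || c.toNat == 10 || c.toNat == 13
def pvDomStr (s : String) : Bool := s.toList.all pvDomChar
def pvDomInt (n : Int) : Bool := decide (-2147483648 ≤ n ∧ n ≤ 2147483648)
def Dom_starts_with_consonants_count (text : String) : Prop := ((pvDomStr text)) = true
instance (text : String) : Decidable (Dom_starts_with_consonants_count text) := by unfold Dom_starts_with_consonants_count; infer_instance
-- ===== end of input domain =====

-- B replaces split()+per-word indexing by one character scan detecting word starts with a prev_is_space flag (alternative; same cost).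

-- ===== PORT A =====
-- shared module helper: char.isalpha() and char not in "aeiouyAEIOUY"
def is_consonant (c : Char) : Bool :=
  PySem.Chars.isalpha c && !(PySem.Chars.isIn [c] "aeiouyAEIOUY".toList)

-- word[0] → pyGet?; split() never yields an empty word, so the none branch is unreachable
def starts_with_consonants_count (text : String) : Int :=
  (PySem.Str.split₀ text).foldl
    (fun count word =>
      if (PySem.Str.pyGet? word 0).any is_consonant then count + 1 else count) 0

-- ===== PORT B =====
def starts_with_consonants_count_alt (text : String) : Int :=
  (text.toList.foldl
    (fun (st : Int × Bool) ch =>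
      ((if !PySem.Chars.isspace ch && st.2 && is_consonant ch then st.1 + 1 else st.1),
        PySem.Chars.isspace ch))
    (0, true)).1

-- ===== PRECONDITION & SPEC =====
def Spec_starts_with_consonants_count (text : String) (out : Int) : Prop := out = starts_with_consonants_count_alt text
instance (text : String) (out : Int) : Decidable (Spec_starts_with_consonants_count text out) := by unfold Spec_starts_with_consonants_count; infer_instance

-- ===== CLAIM (what is proved, stated in full; the proofs are below) =====
def Claim_equal_starts_with_consonants_count : Prop := ∀ (text : String), Dom_starts_with_consonants_count text → Spec_starts_with_consonants_count text (starts_with_consonants_count text)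

-- ===== LEMMAS AND PROOFS =====

-- contribution of one word on the A side
def pvWordCnt (w : List Char) : Int :=
  if (PySem.List.pyGet? w 0).any is_consonant then 1 else 0

def pvCntList (ws : List (List Char)) : Int := (ws.map pvWordCnt).sum

-- B's scan as a structural recursion, with the previous-char-is-space flag explicit
def pvScan : List Char → Bool → Int
  | [], _ => 0
  | c :: rest, prev =>
      (if !PySem.Chars.isspace c && prev && is_consonant c then 1 else 0) + pvScan rest (PySem.Chars.isspace c)

theorem pvWordCnt_cons (a : Char) (t : List Char) :
    pvWordCnt (a :: t) = if is_consonant a then 1 else 0 := by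
  simp [pvWordCnt, PySem.List.pyGet?, PySem.List.pyIdx?]

theorem pvWordCnt_snoc (cur : List Char) (c : Char) (h : cur ≠ []) :
    pvWordCnt (cur ++ [c]) = pvWordCnt cur := by
  cases cur with
  | nil => exact absurd rfl h
  | cons a t => rw [List.cons_append, pvWordCnt_cons, pvWordCnt_cons]

theorem pvCntList_rev_cons (w : List Char) (acc : List (List Char)) :
    pvCntList (w :: acc).reverse = pvCntList acc.reverse + pvWordCnt w := by
  simp [pvCntList]

theorem pvFoldB (cs : List Char) (k : Int) (prev : Bool) :
    (cs.foldl
      (fun (st : Int × Bool) ch =>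
        ((if !PySem.Chars.isspace ch && st.2 && is_consonant ch then st.1 + 1 else st.1),
          PySem.Chars.isspace ch)) (k, prev)).1 = k + pvScan cs prev := by
  induction cs generalizing k prev with
  | nil => simp [pvScan]
  | cons c rest ih =>
      simp only [List.foldl, pvScan, ih]
      split_ifs <;> ring

theorem pvGo (rest cur : List Char) (acc : List (List Char)) :
    pvCntList (PySem.Chars.split₀.go rest cur acc)
      = pvCntList acc.reverse + (if cur.isEmpty then 0 else pvWordCnt cur.reverse)
        + pvScan rest cur.isEmpty := by
  induction rest generalizing cur acc with
  | nil =>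
      by_cases h : cur.isEmpty
      · have hc : cur = [] := by cases cur <;> simp_all
        subst hc
        simp [PySem.Chars.split₀.go, pvScan]
      · have hcur : cur ≠ [] := by cases cur <;> simp_all
        rw [show PySem.Chars.split₀.go [] cur acc
              = (if cur.isEmpty then acc.reverse else (cur.reverse :: acc).reverse) from rfl,
            if_neg h, if_neg h, pvCntList_rev_cons]
        simp [pvScan]
  | cons c rest ih =>
      rw [show PySem.Chars.split₀.go (c :: rest) cur acc
            = (if PySem.Chars.isspace c then
                 (if cur.isEmpty then PySem.Chars.split₀.go rest [] acc
                  else PySem.Chars.split₀.go rest [] (cur.reverse :: acc))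
               else PySem.Chars.split₀.go rest (c :: cur) acc) from rfl]
      by_cases hs : PySem.Chars.isspace c = true
      · rw [if_pos hs]
        by_cases h : cur.isEmpty
        · rw [if_pos h, ih]
          simp [pvScan, hs, h]
        · rw [if_neg h, ih, pvCntList_rev_cons]
          simp [pvScan, hs, h]
      · have hs' : PySem.Chars.isspace c = false := by simp_all
        rw [if_neg (by simp [hs']), ih]
        by_cases h : cur.isEmpty
        · have hc : cur = [] := by cases cur <;> simp_all
          subst hc
          simp [pvScan, hs', pvWordCnt_cons]
          ring
        · have hcur : cur ≠ [] := by cases cur <;> simp_all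
          have hrev : cur.reverse ≠ [] := by simpa using hcur
          rw [show ((c :: cur).reverse) = cur.reverse ++ [c] from by simp,
              show ((c :: cur).isEmpty) = false from rfl]
          rw [pvWordCnt_snoc _ _ hrev]
          simp [pvScan, hs', h]

theorem pvCntStr (ws : List (List Char)) (k : Int) :
    (ws.map String.ofList).foldl
        (fun count word => if (PySem.Str.pyGet? word 0).any is_consonant then count + 1 else count) k
      = k + pvCntList ws := by
  induction ws generalizing k with
  | nil => simp [pvCntList]
  | cons w rest ih =>
      have hb : PySem.Str.pyGet? (String.ofList w) 0 = PySem.List.pyGet? w 0 := by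
        simp [PySem.Str.pyGet?]
      simp only [List.map_cons, List.foldl_cons, hb]
      rw [ih]
      simp only [pvCntList, List.map_cons, List.sum_cons, pvWordCnt]
      split_ifs <;> ring

-- ===== VERDICT (by name: the statement is the Claim_ definition above) =====
theorem starts_with_consonants_count_spec : Claim_equal_starts_with_consonants_count := by
  intro text _
  unfold Spec_starts_with_consonants_count starts_with_consonants_count starts_with_consonants_count_alt
  rw [pvFoldB,
      show PySem.Str.split₀ text = (PySem.Chars.split₀ text.toList).map String.ofList from rfl,
      pvCntStr]
  unfold PySem.Chars.split₀
  rw [pvGo]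
  simp [pvCntList]
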